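-- pv_equiv track=rewrite | github.com/Minos1163/DS3 | scripts/auto_fix_blanklines_and_decorators.py | fix_blanklines_and_decorators
-- ===== SOURCE A (Python) =====
-- from typing import List
--
-- def fix_blanklines_and_decorators(text: str) -> str:
--     lines = [ln.rstrip() for ln in text.splitlines()]
--
--     # Collapse 3+ blank lines to 2
--     out: List[str] = []
--     blank_run = 0
--     for ln in lines:
--         if ln == "":
--             blank_run += 1
--         else:
--             if blank_run > 2:
--                 out.extend(["", ""])
--             elif blank_run > 0:
--                 out.extend([""] * blank_run)
--             blank_run = 0
--             out.append(ln)
--     if blank_run > 0: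
--         if blank_run > 2:
--             out.extend(["", ""])
--         else:
--             out.extend([""] * blank_run)
--
--     # Remove blank lines between decorator(s) and def/class
--     final: List[str] = []
--     i = 0
--     n = len(out)
--     while i < n:
--         ln = out[i]
--         final.append(ln)
--         if ln.strip().startswith("@"):
--             # peek ahead: remove intermediate blank lines until next non-blank
--             j = i + 1
--             while j < n and out[j] == "":
--                 j += 1
--             if j < n and (out[j].lstrip().startswith("def ") or out[j].lstrip().startswith("class ")):
--                 # remove blank lines between i and j
--                 # so we need to skip adding the blank lines
--                 # advance i to j-1 so next loop will append the def/class line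
--                 i = j - 1
--         i += 1
--
--     result = "\n".join(final)
--     # Ensure single trailing newline
--     if not result.endswith("\n"):
--         result += "\n"
--     return result
-- ===== SOURCE B (Python) =====
-- def fix_blanklines_and_decorators(text: str) -> str:
--     # Single pass: pending blank counter + last emitted non-blank line.
--     out = []
--     blank_run = 0
--     last = None
--     for ln in (l.rstrip() for l in text.splitlines()):
--         if ln == "":
--             blank_run += 1
--             continue
--         if not (last is not None and last.strip().startswith("@")
--                 and (ln.lstrip().startswith("def ") or ln.lstrip().startswith("class "))):
--             out.extend([""] * min(blank_run, 2))
--         blank_run = 0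
--         out.append(ln)
--         last = ln
--     out.extend([""] * min(blank_run, 2))
--     result = "\n".join(out)
--     return result if result.endswith("\n") else result + "\n"
-- ===== Notes on version B (the rewrite author's own statement) =====
-- stated objective: simpler
-- what changed: Replaces A's two passes (first collapse blank runs into a list, then an index-based while loop with lookahead that deletes blanks between a decorator and def/class) by one fused pass that keeps a pending-blank counter and the last emitted non-blank line, emitting min(run,2) blanks unless the previous non-blank was a decorator and the current line is def/class.
import Mathlib
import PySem

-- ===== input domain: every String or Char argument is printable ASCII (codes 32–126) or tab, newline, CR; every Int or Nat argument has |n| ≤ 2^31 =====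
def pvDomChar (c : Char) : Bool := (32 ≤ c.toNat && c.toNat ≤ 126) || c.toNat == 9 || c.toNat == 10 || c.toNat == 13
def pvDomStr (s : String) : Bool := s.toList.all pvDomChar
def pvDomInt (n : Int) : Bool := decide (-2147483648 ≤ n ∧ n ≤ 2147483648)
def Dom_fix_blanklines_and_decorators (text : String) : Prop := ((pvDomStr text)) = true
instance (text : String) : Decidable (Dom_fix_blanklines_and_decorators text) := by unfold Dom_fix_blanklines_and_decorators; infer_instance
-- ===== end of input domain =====

-- B fuses A's two passes (collapse blank runs, then delete blanks between decorator and def/class via an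
-- index lookahead loop) into ONE pass with a pending-blank counter and the last emitted non-blank line (simpler).

-- ===== PORT A =====

-- ln.strip().startswith("@")
def pvIsDecor (ln : String) : Bool := PySem.Str.startswith (PySem.Str.strip ln) "@"

-- ln.lstrip().startswith("def ") or ln.lstrip().startswith("class ")
def pvIsDefClass (ln : String) : Bool :=
  PySem.Str.startswith (PySem.Str.lstrip ln) "def " || PySem.Str.startswith (PySem.Str.lstrip ln) "class "

-- the inner 'while j < n and out[j] == "": j += 1' peek of A: is the next non-blank line a def/class?
def pvNextIsDefClass (rest : List String) : Bool :=
  match rest.dropWhile (fun s => s == "") with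
  | x :: _ => pvIsDefClass x
  | [] => false

-- one step of A's first for loop (state: out, blank_run)
def pvP1Step (s : List String × Nat) (ln : String) : List String × Nat :=
  if ln == "" then (s.1, s.2 + 1)
  else ((if s.2 > 2 then s.1 ++ ["", ""] else if s.2 > 0 then s.1 ++ List.replicate s.2 "" else s.1) ++ [ln], 0)

-- A's second while loop: append the line; after a decorator whose next non-blank is def/class,
-- continue from that non-blank line (skipping the blanks), else continue with the next line.
def pvPass2 : List String → List String
  | [] => []
  | ln :: rest =>
    if pvIsDecor ln && pvNextIsDefClass rest then
      ln :: pvPass2 (rest.dropWhile (fun s => s == ""))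
    else
      ln :: pvPass2 rest
  termination_by ls => ls.length
  decreasing_by
  · have := List.length_dropWhile_le (fun s => s == "") rest
    simp only [List.length_cons]
    omega
  · simp

def fix_blanklines_and_decorators (text : String) : String :=
  let lines := (PySem.Str.splitlines text).map PySem.Str.rstrip
  let s := lines.foldl pvP1Step ([], 0)
  let out := if s.2 > 0 then (if s.2 > 2 then s.1 ++ ["", ""] else s.1 ++ List.replicate s.2 "") else s.1
  let final := pvPass2 out
  let result := PySem.Str.join "\n" final
  if PySem.Str.endswith result "\n" then result else result ++ "\n"

-- ===== PORT B =====

-- last is not None and last.strip().startswith("@")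
def pvDecPrev (last : Option String) : Bool :=
  match last with
  | some s => pvIsDecor s
  | none => false

-- one step of B's single loop (state: out, blank_run, last)
def pvBStep (s : List String × Nat × Option String) (ln : String) : List String × Nat × Option String :=
  if ln == "" then (s.1, s.2.1 + 1, s.2.2)
  else
    ((if !(pvDecPrev s.2.2 && pvIsDefClass ln) then s.1 ++ List.replicate (min s.2.1 2) "" else s.1) ++ [ln],
     0, some ln)

def fix_blanklines_and_decorators_alt (text : String) : String :=
  let s := ((PySem.Str.splitlines text).map PySem.Str.rstrip).foldl pvBStep ([], 0, none)
  let out := s.1 ++ List.replicate (min s.2.1 2) ""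
  let result := PySem.Str.join "\n" out
  if PySem.Str.endswith result "\n" then result else result ++ "\n"

-- ===== PRECONDITION & SPEC =====
def Spec_fix_blanklines_and_decorators (text : String) (out : String) : Prop := out = fix_blanklines_and_decorators_alt text
instance (text : String) (out : String) : Decidable (Spec_fix_blanklines_and_decorators text out) := by unfold Spec_fix_blanklines_and_decorators; infer_instance

-- ===== CLAIM (what is proved, stated in full; the proofs are below) =====
def Claim_equal_fix_blanklines_and_decorators : Prop := ∀ (text : String), Dom_fix_blanklines_and_decorators text → Spec_fix_blanklines_and_decorators text (fix_blanklines_and_decorators text)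

-- ===== LEMMAS AND PROOFS =====

-- a capped blank run, as emitted by both programs
def pvCap (k : Nat) : List String := List.replicate (min k 2) ""

-- structural form of A's first pass
def pvP1R : List String → Nat → List String
  | [], k => pvCap k
  | ln :: t, k => if ln = "" then pvP1R t (k + 1) else pvCap k ++ ln :: pvP1R t 0

-- structural form of B's fused pass
def pvFR : List String → Nat → Option String → List String
  | [], k, _ => pvCap k
  | ln :: t, k, last =>
    if ln = "" then pvFR t (k + 1) last
    else (if pvDecPrev last && pvIsDefClass ln then [] else pvCap k) ++ ln :: pvFR t 0 (some ln)

theorem pvMem_cap {x : String} {k : Nat} (h : x ∈ pvCap k) : x = "" := by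
  simpa [pvCap] using (List.eq_of_mem_replicate h)

theorem pvIsDecor_empty : pvIsDecor "" = false := by decide

theorem pvIfChain_eq (acc : List String) (k : Nat) :
    (if k > 2 then acc ++ ["", ""] else if k > 0 then acc ++ List.replicate k "" else acc) = acc ++ pvCap k := by
  unfold pvCap
  split_ifs with h1 h2
  · have : min k 2 = 2 := by omega
    rw [this]; rfl
  · have : min k 2 = k := by omega
    rw [this]
  · have hk : k = 0 := by omega
    simp [hk]

theorem pvFold1 (ls : List String) (acc : List String) (k : Nat) :
    (let s := ls.foldl pvP1Step (acc, k);
     if s.2 > 0 then (if s.2 > 2 then s.1 ++ ["", ""] else s.1 ++ List.replicate s.2 "") else s.1)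
      = acc ++ pvP1R ls k := by
  induction ls generalizing acc k with
  | nil =>
    simp only [List.foldl_nil, pvP1R]
    have := pvIfChain_eq acc k
    split_ifs at this ⊢ with h1 h2 <;> simp_all <;> omega
  | cons ln t ih =>
    by_cases h : ln = ""
    · simp only [List.foldl_cons, pvP1Step, h, beq_self_eq_true, if_true, pvP1R]
      exact ih acc (k + 1)
    · simp only [List.foldl_cons, pvP1Step, beq_iff_eq, h, if_false, pvP1R]
      rw [ih, pvIfChain_eq]
      simp [h]

theorem pvFold2 (ls : List String) (acc : List String) (k : Nat) (last : Option String) :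
    (let s := ls.foldl pvBStep (acc, k, last); s.1 ++ List.replicate (min s.2.1 2) "")
      = acc ++ pvFR ls k last := by
  induction ls generalizing acc k last with
  | nil => simp [pvFR, pvCap]
  | cons ln t ih =>
    by_cases h : ln = ""
    · simp only [List.foldl_cons, pvBStep, h, beq_self_eq_true, if_true, pvFR]
      exact ih acc (k + 1) last
    · simp only [List.foldl_cons, pvBStep, beq_iff_eq, h, if_false, pvFR]
      rw [ih]
      cases hd : pvDecPrev last <;> cases hic : pvIsDefClass ln <;> simp [hd, hic, pvCap]

theorem pvPass2_nil : pvPass2 [] = [] := by rw [pvPass2]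

theorem pvPass2_cons (ln : String) (rest : List String) :
    pvPass2 (ln :: rest) =
      if pvIsDecor ln && pvNextIsDefClass rest then
        ln :: pvPass2 (rest.dropWhile (fun s => s == ""))
      else ln :: pvPass2 rest := by
  rw [pvPass2]

theorem pvPass2_blank_prefix (pre : List String) (hpre : ∀ x ∈ pre, x = "") (L : List String) :
    pvPass2 (pre ++ L) = pre ++ pvPass2 L := by
  induction pre with
  | nil => simp
  | cons x t ih =>
    have hx : x = "" := hpre x (List.mem_cons_self ..)
    have ht : ∀ y ∈ t, y = "" := fun y hy => hpre y (List.mem_cons_of_mem _ hy)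
    subst hx
    rw [List.cons_append, pvPass2_cons]
    simp only [pvIsDecor_empty, Bool.false_and]
    rw [if_neg (by simp), ih ht]
    simp

theorem pvPass2_blanks (pre : List String) (hpre : ∀ x ∈ pre, x = "") : pvPass2 pre = pre := by
  have := pvPass2_blank_prefix pre hpre []
  simpa [pvPass2_nil] using this

theorem pvDropWhile_blank_prefix (pre : List String) (hpre : ∀ x ∈ pre, x = "")
    (x : String) (hx : x ≠ "") (r : List String) :
    (pre ++ x :: r).dropWhile (fun s => s == "") = x :: r := by
  induction pre with
  | nil => simp [List.dropWhile_cons, hx]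
  | cons y t ih =>
    have hy : y = "" := hpre y (List.mem_cons_self ..)
    subst hy
    rw [List.cons_append, List.dropWhile_cons]
    simpa using ih (fun z hz => hpre z (List.mem_cons_of_mem _ hz))

theorem pvHead_dropWhile_ne {t : List String} {x : String} {t' : List String}
    (h : t.dropWhile (fun s => s == "") = x :: t') : x ≠ "" := by
  induction t with
  | nil => simp at h
  | cons y s ih =>
    rw [List.dropWhile_cons] at h
    by_cases hy : y = ""
    · subst hy
      simp only [beq_self_eq_true, if_true] at h
      exact ih h
    · simp only [beq_iff_eq, hy, if_false] at h
      obtain ⟨hx, -⟩ := List.cons.inj h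
      rw [← hx]
      exact hy

-- p1r on a list decomposed at its first non-blank line
theorem pvP1R_split {t : List String} {x : String} {t' : List String}
    (h : t.dropWhile (fun s => s == "") = x :: t') (k : Nat) :
    pvP1R t k = pvCap (k + (t.takeWhile (fun s => s == "")).length) ++ x :: pvP1R t' 0 := by
  induction t generalizing k with
  | nil => simp at h
  | cons y s ih =>
    by_cases hy : y = ""
    · subst hy
      rw [List.dropWhile_cons] at h
      simp only [beq_self_eq_true, if_true] at h
      simp only [pvP1R, if_true, List.takeWhile_cons]
      rw [ih h (k + 1)]
      simp only [beq_self_eq_true, if_true, List.length_cons]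
      ring_nf
    · rw [List.dropWhile_cons] at h
      simp only [beq_iff_eq, hy, if_false] at h
      obtain ⟨hx, ht⟩ := List.cons.inj h
      subst hx; subst ht
      simp [pvP1R, hy, List.takeWhile_cons, beq_iff_eq]

theorem pvP1R_blank {t : List String} (h : t.dropWhile (fun s => s == "") = []) (k : Nat) :
    pvP1R t k = pvCap (k + t.length) := by
  induction t generalizing k with
  | nil => simp [pvP1R]
  | cons y s ih =>
    rw [List.dropWhile_cons] at h
    by_cases hy : y = ""
    · subst hy
      simp only [beq_self_eq_true, if_true] at h
      simp only [pvP1R, if_true, List.length_cons]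
      rw [ih h (k + 1)]
      ring_nf
    · simp [hy] at h

theorem pvFR_split {t : List String} {x : String} {t' : List String}
    (h : t.dropWhile (fun s => s == "") = x :: t') (k : Nat) (last : Option String) :
    pvFR t k last = (if pvDecPrev last && pvIsDefClass x then []
                     else pvCap (k + (t.takeWhile (fun s => s == "")).length)) ++ x :: pvFR t' 0 (some x) := by
  induction t generalizing k with
  | nil => simp at h
  | cons y s ih =>
    by_cases hy : y = ""
    · subst hy
      rw [List.dropWhile_cons] at h
      simp only [beq_self_eq_true, if_true] at h
      simp only [pvFR, if_true, List.takeWhile_cons]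
      rw [ih h (k + 1)]
      simp only [beq_self_eq_true, if_true, List.length_cons]
      ring_nf
    · rw [List.dropWhile_cons] at h
      simp only [beq_iff_eq, hy, if_false] at h
      obtain ⟨hx, ht⟩ := List.cons.inj h
      subst hx; subst ht
      simp [pvFR, hy, List.takeWhile_cons, beq_iff_eq]

theorem pvFR_blank {t : List String} (h : t.dropWhile (fun s => s == "") = []) (k : Nat)
    (last : Option String) : pvFR t k last = pvCap (k + t.length) := by
  induction t generalizing k with
  | nil => simp [pvFR]
  | cons y s ih =>
    rw [List.dropWhile_cons] at h
    by_cases hy : y = ""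
    · subst hy
      simp only [beq_self_eq_true, if_true] at h
      simp only [pvFR, if_true, List.length_cons]
      rw [ih h (k + 1)]
      ring_nf
    · simp [hy] at h

theorem pvLen_dropWhile_cons {t : List String} {x : String} {t' : List String}
    (h : t.dropWhile (fun s => s == "") = x :: t') : (x :: t').length ≤ t.length := by
  have := List.length_dropWhile_le (fun s => s == "") t
  rw [h] at this
  exact this

-- MAIN: A's second pass applied to A's first pass = B's fused pass
theorem pvMain : ∀ (n : Nat) (ls : List String), ls.length ≤ n → ∀ (k : Nat),
    pvPass2 (pvP1R ls k) = pvFR ls k none := by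
  intro n
  induction n with
  | zero =>
    intro ls hls k
    have : ls = [] := List.eq_nil_of_length_eq_zero (by omega)
    subst this
    simp only [pvP1R, pvFR]
    exact pvPass2_blanks _ (fun x hx => pvMem_cap hx)
  | succ n ih =>
    intro ls hls k
    cases ls with
    | nil =>
      simp only [pvP1R, pvFR]
      exact pvPass2_blanks _ (fun x hx => pvMem_cap hx)
    | cons ln t =>
      by_cases hln : ln = ""
      · subst hln
        simp only [pvP1R, pvFR, if_true]
        exact ih t (by simpa using Nat.lt_succ_iff.mp (by simpa using hls)) (k + 1)
      · simp only [pvP1R, pvFR, hln, if_false]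
        have hlt : t.length ≤ n := by simpa using Nat.lt_succ_iff.mp (by simpa using hls)
        rw [pvPass2_blank_prefix (pvCap k) (fun x hx => pvMem_cap hx)]
        rw [pvPass2_cons]
        simp only [pvDecPrev, Bool.false_and, Bool.false_eq_true, if_false, List.nil_append]
        -- analyse the first non-blank line of t
        cases hdw : t.dropWhile (fun s => s == "") with
        | nil =>
          -- t is all blank: no def/class ahead, nothing is skipped either way
          have hp1 := pvP1R_blank hdw 0
          have hnext : pvNextIsDefClass (pvP1R t 0) = false := by
            unfold pvNextIsDefClass
            rw [hp1, List.dropWhile_eq_nil_iff.mpr]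
            intro x hx
            simp [pvMem_cap hx]
          rw [hnext]
          simp only [Bool.and_false, Bool.false_eq_true, if_false]
          rw [ih t hlt 0, pvFR_blank hdw, pvFR_blank hdw]
        | cons x t' =>
          have hx : x ≠ "" := pvHead_dropWhile_ne hdw
          have hp1 := pvP1R_split hdw 0
          have hdw2 : (pvP1R t 0).dropWhile (fun s => s == "") = x :: pvP1R t' 0 := by
            rw [hp1]
            exact pvDropWhile_blank_prefix _ (fun y hy => pvMem_cap hy) x hx _
          have hnext : pvNextIsDefClass (pvP1R t 0) = pvIsDefClass x := by
            unfold pvNextIsDefClass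
            rw [hdw2]
          rw [hnext]
          have hx0 : pvP1R (x :: t') 0 = x :: pvP1R t' 0 := by
            simp [pvP1R, hx, pvCap]
          have hfr0 : pvFR (x :: t') 0 none = x :: pvFR t' 0 (some x) := by
            simp [pvFR, hx, pvDecPrev, pvCap]
          have hlen : (x :: t').length ≤ n := le_trans (pvLen_dropWhile_cons hdw) hlt
          by_cases hc : (pvIsDecor ln && pvIsDefClass x) = true
          · rw [if_pos hc, hdw2, ← hx0, ih (x :: t') hlen 0, hfr0]
            rw [pvFR_split hdw 0 (some ln)]
            have : (pvDecPrev (some ln) && pvIsDefClass x) = true := by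
              simp only [pvDecPrev]
              exact hc
            rw [if_pos this]
            simp
          · rw [if_neg hc, ih t hlt 0]
            rw [pvFR_split hdw 0 (some ln), pvFR_split hdw 0 none]
            have h1 : (pvDecPrev (some ln) && pvIsDefClass x) = false := by
              simp only [pvDecPrev]
              exact Bool.not_eq_true _ ▸ Bool.eq_false_iff.mpr hc
            rw [h1]
            simp [pvDecPrev]

-- ===== VERDICT (by name: the statement is the Claim_ definition above) =====
theorem fix_blanklines_and_decorators_spec : Claim_equal_fix_blanklines_and_decorators := by
  unfold Claim_equal_fix_blanklines_and_decorators Spec_fix_blanklines_and_decorators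
  intro text _
  unfold fix_blanklines_and_decorators fix_blanklines_and_decorators_alt
  have h1 := pvFold1 ((PySem.Str.splitlines text).map PySem.Str.rstrip) [] 0
  have h2 := pvFold2 ((PySem.Str.splitlines text).map PySem.Str.rstrip) [] 0 none
  simp only [List.nil_append] at h1 h2
  simp only [h1, h2]
  rw [pvMain ((PySem.Str.splitlines text).map PySem.Str.rstrip).length _ le_rfl 0]
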